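-- pv_equiv track=rewrite | github.com/JonathonRiley/advent_of_code | 2021/day1/solution.py | window_increase
-- ===== SOURCE A (Python) =====
-- from typing import List
--
-- def window_increase(data: List[int]) -> int:
--     increases = 0
--     for step_index in range(len(data[3:])):
--         step_ahead = data[3+step_index]
--         step_behind = data[step_index]
--         if step_ahead > step_behind:
--             increases +=1
--     return increases
-- ===== SOURCE B (Python) =====
-- from typing import List
--
-- def window_increase(data: List[int]) -> int:
--     w = [data[j] + data[j + 1] + data[j + 2] for j in range(len(data) - 2)]
--     return sum(1 for j in range(len(w) - 1) if w[j + 1] > w[j])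
-- ===== Notes on version B (the rewrite author's own statement) =====
-- stated objective: alternative
-- what changed: B materialises the list of 3-element sliding-window sums and counts adjacent increases between consecutive sums, instead of A's direct comparison of data[i+3] with data[i].
import Mathlib
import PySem

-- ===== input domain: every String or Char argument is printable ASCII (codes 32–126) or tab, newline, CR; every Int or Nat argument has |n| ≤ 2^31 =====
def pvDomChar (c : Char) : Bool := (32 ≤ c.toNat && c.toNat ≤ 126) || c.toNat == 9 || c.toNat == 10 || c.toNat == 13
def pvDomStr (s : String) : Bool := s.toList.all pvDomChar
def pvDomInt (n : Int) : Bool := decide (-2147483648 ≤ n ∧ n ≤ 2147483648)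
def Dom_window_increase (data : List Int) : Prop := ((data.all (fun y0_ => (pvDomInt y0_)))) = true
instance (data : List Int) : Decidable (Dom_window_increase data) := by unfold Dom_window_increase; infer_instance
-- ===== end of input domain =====

-- B counts increases between consecutive materialised 3-window sums instead of comparing data[i+3] with data[i]; alternative decomposition, same cost.


-- ===== PORT A =====
-- data[3+i] / data[i] are always in range for i < len(data[3:]), so getD is exact here
def window_increase (data : List Int) : Int :=
  (List.range (data.drop 3).length).foldl
    (fun increases step_index =>
      let step_ahead := data.getD (3 + step_index) 0
      let step_behind := data.getD step_index 0
      if step_ahead > step_behind then increases + 1 else increases)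
    0

-- ===== PORT B =====
-- window sums w[j] = data[j]+data[j+1]+data[j+2]; indices always in range, getD exact
def window_increase_alt (data : List Int) : Int :=
  let w : List Int := (List.range (data.length - 2)).map
    (fun j => data.getD j 0 + data.getD (j + 1) 0 + data.getD (j + 2) 0)
  (List.range (w.length - 1)).foldl
    (fun acc j => if w.getD (j + 1) 0 > w.getD j 0 then acc + 1 else acc)
    0

-- ===== PRECONDITION & SPEC =====
def Spec_window_increase (data : List Int) (out : Int) : Prop := out = window_increase_alt data
instance (data : List Int) (out : Int) : Decidable (Spec_window_increase data out) := by unfold Spec_window_increase; infer_instance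

-- ===== CLAIM (what is proved, stated in full; the proofs are below) =====
def Claim_equal_window_increase : Prop := ∀ (data : List Int), Dom_window_increase data → Spec_window_increase data (window_increase data)

-- ===== LEMMAS AND PROOFS =====

theorem pv_w_getD (data : List Int) (j : Nat) (hj : j < data.length - 2) :
    ((List.range (data.length - 2)).map
      (fun j => data.getD j 0 + data.getD (j + 1) 0 + data.getD (j + 2) 0)).getD j 0
    = data.getD j 0 + data.getD (j + 1) 0 + data.getD (j + 2) 0 := by
  rw [List.getD_eq_getElem?_getD, List.getElem?_map]
  simp [List.getElem?_range hj]

-- ===== VERDICT (by name: the statement is the Claim_ definition above) =====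
theorem window_increase_spec : Claim_equal_window_increase := by
  intro data _
  unfold Spec_window_increase window_increase window_increase_alt
  simp only [List.length_map, List.length_range, List.length_drop]
  have hlen : data.length - 2 - 1 = data.length - 3 := by omega
  rw [hlen]
  apply PySem.List.foldl_congr_mem
  intro acc j hj
  have hj' : j < data.length - 3 := List.mem_range.mp hj
  rw [pv_w_getD data j (by omega), pv_w_getD data (j + 1) (by omega)]
  have : (data.getD (j+1) 0 + data.getD (j+1+1) 0 + data.getD (j+1+2) 0 >
          data.getD j 0 + data.getD (j+1) 0 + data.getD (j+2) 0) ↔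
         (data.getD (3 + j) 0 > data.getD j 0) := by
    have h1 : j + 1 + 1 = j + 2 := by omega
    have h2 : j + 1 + 2 = 3 + j := by omega
    rw [h1, h2]
    omega
  simp only [this]
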